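-- pv_equiv track=rewrite | github.com/HavosAi/HavosAi | src/text_processing/affiliations_extractor.py | prepare_dict_for_renaming
-- ===== SOURCE A (Python) =====
-- def prepare_dict_for_renaming(new_mapping):
--     new_key_remapped_vals = {}
--     for key_ in new_mapping:
--         if new_mapping[key_] not in new_key_remapped_vals:
--             new_key_remapped_vals[new_mapping[key_]] = []
--         new_key_remapped_vals[new_mapping[key_]].append(key_)
--     names_to_rename = {}
--     for remapped_val in new_key_remapped_vals:
--         if "foundation" in remapped_val.lower():
--             continue
--         for raw_data in new_key_remapped_vals[remapped_val]:
--             if "foundation" in raw_data.lower() and remapped_val.lower() in raw_data.lower():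
--                 names_to_rename[remapped_val] = remapped_val + " Foundation"
--                 break
--     return names_to_rename
-- ===== SOURCE B (Python) =====
-- def prepare_dict_for_renaming(new_mapping):
--     # one online pass: per value a boolean flag, flipped by the first qualifying key
--     status = {}
--     for key, value in new_mapping.items():
--         if "foundation" in value.lower():
--             continue
--         hit = status.get(value, False)
--         if not hit and "foundation" in key.lower() and value.lower() in key.lower():
--             hit = True
--         status[value] = hit
--     return {value: value + " Foundation" for value, ok in status.items() if ok}
-- ===== Notes on version B (the rewrite author's own statement) =====
-- stated objective: alternative
-- what changed: A builds an intermediate value-to-keys grouping dict and then rescans each group with an inner break loop; B keeps no key lists at all: one online pass maintains a boolean flag per value, flipped by the first qualifying key, and the result is read off the flag dict.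
import Mathlib
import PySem

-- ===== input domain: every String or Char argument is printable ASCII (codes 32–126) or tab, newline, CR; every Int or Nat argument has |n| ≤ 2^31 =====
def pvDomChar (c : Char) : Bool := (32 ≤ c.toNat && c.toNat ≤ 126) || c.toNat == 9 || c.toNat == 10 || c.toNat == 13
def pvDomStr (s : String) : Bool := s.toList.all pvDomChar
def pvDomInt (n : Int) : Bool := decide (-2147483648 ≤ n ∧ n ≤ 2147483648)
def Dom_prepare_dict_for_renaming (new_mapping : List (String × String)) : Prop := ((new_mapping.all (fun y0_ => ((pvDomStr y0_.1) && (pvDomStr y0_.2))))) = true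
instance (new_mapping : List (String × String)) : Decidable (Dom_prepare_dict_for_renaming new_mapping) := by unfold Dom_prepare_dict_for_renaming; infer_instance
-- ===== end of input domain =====

-- B replaces A's build-a-value→keys-index-then-grouped-rescan by a single online pass that
-- keeps one boolean flag per value, flipped by the first qualifying key (objective: alternative).

-- ===== PORT A =====
-- inner `for raw_data in …: if …: …; break` loop of A (returns whether the break fired)
def pvAnyHit (remapped_val : String) : List String → Bool
  | [] => false
  | raw :: rest =>
      if PySem.Str.isIn "foundation" (PySem.Str.lower raw)
          && PySem.Str.isIn (PySem.Str.lower remapped_val) (PySem.Str.lower raw)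
      then true
      else pvAnyHit remapped_val rest

def prepare_dict_for_renaming (new_mapping : List (String × String)) : List (String × String) :=
  -- first loop: group the keys by their mapped value ('if not in: init []' + append = modify with default [])
  let grouped : PySem.Dict String (List String) :=
    new_mapping.foldl (fun d p => d.modify p.2 [] (fun l => l ++ [p.1])) PySem.Dict.empty
  -- second loop, over the grouped dict
  let names : PySem.Dict String String :=
    grouped.items.foldl (fun nd p =>
      if PySem.Str.isIn "foundation" (PySem.Str.lower p.1) then nd
      else if pvAnyHit p.1 p.2 then nd.insert p.1 (p.1 ++ " Foundation") else nd)
      PySem.Dict.empty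
  names.items

-- ===== PORT B =====
-- Source B's single loop: per value a boolean flag, flipped by the first qualifying key
def pvStatus (new_mapping : List (String × String)) : PySem.Dict String Bool :=
  new_mapping.foldl (fun d p =>
    if PySem.Str.isIn "foundation" (PySem.Str.lower p.2) then d   -- continue
    else
      let hit := d.getD p.2 false
      let hit := if !hit && (PySem.Str.isIn "foundation" (PySem.Str.lower p.1)
            && PySem.Str.isIn (PySem.Str.lower p.2) (PySem.Str.lower p.1)) then true else hit
      d.insert p.2 hit) PySem.Dict.empty

def prepare_dict_for_renaming_alt (new_mapping : List (String × String)) : List (String × String) :=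
  -- Source B's final dict comprehension over status.items()
  ((pvStatus new_mapping).items.foldl (fun d q =>
      if q.2 then d.insert q.1 (q.1 ++ " Foundation") else d) PySem.Dict.empty).items

-- ===== PRECONDITION & SPEC =====
def Spec_prepare_dict_for_renaming (new_mapping : List (String × String)) (out : List (String × String)) : Prop := out = prepare_dict_for_renaming_alt new_mapping
instance (new_mapping : List (String × String)) (out : List (String × String)) : Decidable (Spec_prepare_dict_for_renaming new_mapping out) := by unfold Spec_prepare_dict_for_renaming; infer_instance

-- ===== CLAIM (what is proved, stated in full; the proofs are below) =====
def Claim_equal_prepare_dict_for_renaming : Prop := ∀ (new_mapping : List (String × String)), Dom_prepare_dict_for_renaming new_mapping → Spec_prepare_dict_for_renaming new_mapping (prepare_dict_for_renaming new_mapping)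

-- ===== LEMMAS AND PROOFS =====

-- the canonical form both programs are reduced to: over the distinct values in first-appearance
-- order, keep v iff "foundation" not in v.lower() and some key mapped to v matches
def pvCond (l : List (String × String)) (v : String) : Bool :=
  !(PySem.Str.isIn "foundation" (PySem.Str.lower v))
    && l.any (fun p => p.2 == v
          && PySem.Str.isIn "foundation" (PySem.Str.lower p.1)
          && PySem.Str.isIn (PySem.Str.lower v) (PySem.Str.lower p.1))

def pvCanon (l : List (String × String)) : List (String × String) :=
  (PySem.Set.ofList (l.map (fun p => p.2))).filterMap
    (fun v => if pvCond l v then some (v, v ++ " Foundation") else none)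

-- merging A's skip-guard and the inner test into one guard
theorem pv_if_guard {α : Type} (S Y : Bool) (a b : α) :
    (if S then b else if Y then a else b) = if (!S && Y) then a else b := by
  cases S <;> cases Y <;> simp

-- A's inner break-loop is List.any of its condition
theorem pvAnyHit_eq_any (v : String) (l : List String) :
    pvAnyHit v l = l.any (fun raw =>
      PySem.Str.isIn "foundation" (PySem.Str.lower raw)
        && PySem.Str.isIn (PySem.Str.lower v) (PySem.Str.lower raw)) := by
  induction l with
  | nil => rfl
  | cons a t ih =>
    rw [show pvAnyHit v (a :: t)
        = (if PySem.Str.isIn "foundation" (PySem.Str.lower a)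
              && PySem.Str.isIn (PySem.Str.lower v) (PySem.Str.lower a)
           then true else pvAnyHit v t) from rfl]
    by_cases h : PySem.Str.isIn "foundation" (PySem.Str.lower a)
        && PySem.Str.isIn (PySem.Str.lower v) (PySem.Str.lower a) <;>
      simp [ih, List.any_cons]

-- a fold of guarded inserts at pairwise-distinct fresh keys appends its filterMap
theorem items_foldl_cond_insert (c : String → Bool) (g : String → String)
    (D : List String) (nd : PySem.Dict String String) (hnd : D.Nodup)
    (hfresh : ∀ v ∈ D, nd.contains v = false) :
    (D.foldl (fun nd v => if c v then nd.insert v (g v) else nd) nd).items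
      = nd.items ++ D.filterMap (fun v => if c v then some (v, g v) else none) := by
  induction D generalizing nd with
  | nil => simp
  | cons v D ih =>
    simp only [List.foldl_cons, List.filterMap_cons]
    have hvD : v ∉ D := (List.nodup_cons.mp hnd).1
    by_cases hc : c v
    · have hfresh' : ∀ w ∈ D, ((nd.insert v (g v)).contains w) = false := by
        intro w hw
        rw [PySem.Dict.contains_insert]
        have hne : w ≠ v := fun h => hvD (h ▸ hw)
        simp [hne, hfresh w (List.mem_cons_of_mem _ hw)]
      rw [if_pos hc, ih _ (List.nodup_cons.mp hnd).2 hfresh',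
        PySem.Dict.items_insert_of_not_contains _ _ (hfresh v List.mem_cons_self)]
      simp [hc]
    · rw [if_neg hc, ih _ (List.nodup_cons.mp hnd).2
        (fun w hw => hfresh w (List.mem_cons_of_mem _ hw))]
      simp [hc]

-- A equals the canonical form
theorem pvA_eq_canon (nm : List (String × String)) :
    prepare_dict_for_renaming nm = pvCanon nm := by
  set grouped : PySem.Dict String (List String) :=
    nm.foldl (fun d p => d.modify p.2 [] (fun l => l ++ [p.1])) PySem.Dict.empty with hg
  have hkeys : grouped.keys = PySem.Set.ofList (nm.map (fun p => p.2)) := by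
    rw [hg, PySem.Dict.keys_foldl_modify_key nm (fun p => p.2) [] (fun _ p l => l ++ [p.1])]
    simp [PySem.Set.update_nil_left]
  have hnodup : grouped.keys.Nodup := by rw [hkeys]; exact PySem.Set.nodup_ofList _
  have hgetD : ∀ v, grouped.getD v [] = (nm.filter (fun p => p.2 == v)).map (fun p => p.1) := by
    intro v
    have hswap : grouped = (nm.map Prod.swap).foldl
        (fun d q => d.modify q.1 [] (fun l => l ++ [q.2])) PySem.Dict.empty := by
      rw [hg, List.foldl_map]
      simp [Prod.swap]
    rw [hswap, PySem.Dict.getD_foldl_modify_append]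
    simp [List.filter_map, Function.comp_def, List.map_map, Prod.swap]
  have hitems : grouped.items = grouped.keys.map (fun k => (k, grouped.getD k [])) :=
    PySem.Dict.items_eq_map_keys grouped hnodup []
  have hfun : (fun (nd : PySem.Dict String String) (v : String) =>
        if PySem.Str.isIn "foundation" (PySem.Str.lower v) then nd
        else if pvAnyHit v (grouped.getD v []) then nd.insert v (v ++ " Foundation") else nd)
      = (fun nd v => if pvCond nm v then nd.insert v (v ++ " Foundation") else nd) := by
    funext nd v
    rw [hgetD, pvAnyHit_eq_any, List.any_map, List.any_filter]
    simp only [pvCond, Function.comp_def, ← Bool.and_assoc]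
    exact pv_if_guard _ _ _ _
  have hA : prepare_dict_for_renaming nm
      = (grouped.items.foldl (fun nd p =>
          if PySem.Str.isIn "foundation" (PySem.Str.lower p.1) then nd
          else if pvAnyHit p.1 p.2 then nd.insert p.1 (p.1 ++ " Foundation") else nd)
          PySem.Dict.empty).items := rfl
  rw [hA, hitems, List.foldl_map]
  simp only [hfun]
  rw [items_foldl_cond_insert (pvCond nm) (fun v => v ++ " Foundation") grouped.keys
    PySem.Dict.empty hnodup (fun v _ => PySem.Dict.contains_empty v), hkeys]
  rfl

-- Set.ofList commutes with filter
theorem pv_filter_ofList (q : String → Bool) (xs : List String) :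
    (PySem.Set.ofList xs).filter q = PySem.Set.ofList (xs.filter q) := by
  induction xs with
  | nil => rfl
  | cons a t ih =>
    have hd : ∀ (s : PySem.Set String) (x : String),
        PySem.Set.discard s x = s.filter (fun y => !(y == x)) := by
      intro s x; simp [PySem.Set.discard]
    rw [PySem.Set.ofList_cons, hd, List.filter_cons]
    by_cases hq : q a
    · rw [List.filter_cons_of_pos hq, if_pos hq, PySem.Set.ofList_cons, hd, ← ih,
        List.filter_filter, List.filter_filter]
      exact congrArg (List.cons a) (List.filter_congr (fun y _ => Bool.and_comm _ _))
    · rw [List.filter_cons_of_neg (by simp_all), if_neg (by simp_all), ← ih,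
        List.filter_filter]
      apply List.filter_congr
      intro y _
      by_cases hy : y = a
      · subst hy; simp [hq]
      · simp [hy]

-- the filtered pairs B's loop actually processes (values not containing "foundation")
def pvLF (nm : List (String × String)) : List (String × String) :=
  nm.filter (fun p => !(PySem.Str.isIn "foundation" (PySem.Str.lower p.2)))

-- a loop with a 'continue' guard is the same fold over the filtered list
theorem pv_foldl_guard_filter {α β : Type} (l : List α) (g : α → Bool) (step : β → α → β) (d : β) :
    l.foldl (fun d p => if g p then d else step d p) d
      = (l.filter (fun p => !(g p))).foldl step d := by
  induction l generalizing d with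
  | nil => rfl
  | cons a t ih =>
    by_cases hg : g a <;> simp [hg, ih]

-- B's loop body, with the flag update written as a disjunction
theorem pvStatus_eq_foldl (nm : List (String × String)) :
    pvStatus nm = (pvLF nm).foldl (fun d p =>
      d.insert p.2 (d.getD p.2 false
        || (PySem.Str.isIn "foundation" (PySem.Str.lower p.1)
            && PySem.Str.isIn (PySem.Str.lower p.2) (PySem.Str.lower p.1)))) PySem.Dict.empty := by
  unfold pvStatus pvLF
  rw [pv_foldl_guard_filter]
  congr 1
  funext d p
  cases hh : d.getD p.2 false <;>
    cases hk : PySem.Str.isIn "foundation" (PySem.Str.lower p.1)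
      && PySem.Str.isIn (PySem.Str.lower p.2) (PySem.Str.lower p.1) <;> simp

-- the flag of a value v is: some processed pair had value v and a qualifying key
theorem pv_getD_status_fold (l : List (String × String)) (d : PySem.Dict String Bool) (v : String) :
    ((l.foldl (fun d p =>
      d.insert p.2 (d.getD p.2 false
        || (PySem.Str.isIn "foundation" (PySem.Str.lower p.1)
            && PySem.Str.isIn (PySem.Str.lower p.2) (PySem.Str.lower p.1)))) d).getD v false)
    = (d.getD v false || l.any (fun p => p.2 == v
        && PySem.Str.isIn "foundation" (PySem.Str.lower p.1)
        && PySem.Str.isIn (PySem.Str.lower p.2) (PySem.Str.lower p.1))) := by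
  induction l generalizing d with
  | nil => simp
  | cons p t ih =>
    rw [List.foldl_cons, ih, List.any_cons, PySem.Dict.getD_insert]
    by_cases hv : v = p.2
    · subst hv
      simp [Bool.or_assoc, Bool.and_assoc]
    · have hb : (p.2 == v) = false := beq_eq_false_iff_ne.mpr (Ne.symm hv)
      simp [hv, hb]

-- filterMap of a guarded some over a filtered list folds the filter into the guard
theorem pv_filterMap_if_filter {α β : Type} (q c : α → Bool) (g : α → β) (xs : List α) :
    (xs.filter q).filterMap (fun v => if c v then some (g v) else none)
      = xs.filterMap (fun v => if q v && c v then some (g v) else none) := by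
  induction xs with
  | nil => rfl
  | cons a t ih =>
    by_cases hq : q a <;> by_cases hc : c a <;> simp [hq, hc, ih]

-- B equals the canonical form
theorem pvB_eq_canon (nm : List (String × String)) :
    prepare_dict_for_renaming_alt nm = pvCanon nm := by
  set st := pvStatus nm with hst
  have hkeys : st.keys = PySem.Set.ofList ((pvLF nm).map (fun p => p.2)) := by
    rw [hst, pvStatus_eq_foldl,
      PySem.Dict.keys_foldl_insert_key (pvLF nm) (fun p => p.2) _ PySem.Dict.empty]
    simp [PySem.Set.update_nil_left]
  have hnodup : st.keys.Nodup := by rw [hkeys]; exact PySem.Set.nodup_ofList _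
  have hgetD : ∀ v, st.getD v false = (pvLF nm).any (fun p => p.2 == v
      && PySem.Str.isIn "foundation" (PySem.Str.lower p.1)
      && PySem.Str.isIn (PySem.Str.lower p.2) (PySem.Str.lower p.1)) := by
    intro v
    rw [hst, pvStatus_eq_foldl, pv_getD_status_fold]
    simp
  have hitems : st.items = st.keys.map (fun k => (k, st.getD k false)) :=
    PySem.Dict.items_eq_map_keys st hnodup false
  have hB : prepare_dict_for_renaming_alt nm
      = (st.items.foldl (fun d q =>
          if q.2 then d.insert q.1 (q.1 ++ " Foundation") else d) PySem.Dict.empty).items := rfl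
  rw [hB, hitems, List.foldl_map]
  rw [items_foldl_cond_insert (fun k => st.getD k false) (fun v => v ++ " Foundation")
    st.keys PySem.Dict.empty hnodup (fun v _ => PySem.Dict.contains_empty v)]
  have hvals : PySem.Set.ofList ((pvLF nm).map (fun p => p.2))
      = (PySem.Set.ofList (nm.map (fun p => p.2))).filter
          (fun v => !(PySem.Str.isIn "foundation" (PySem.Str.lower v))) := by
    rw [pv_filter_ofList]
    unfold pvLF
    congr 1
    rw [List.filter_map]
    simp [Function.comp_def]
  rw [show PySem.Dict.items PySem.Dict.empty = ([] : List (String × String)) from rfl,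
    List.nil_append, hkeys, hvals, pv_filterMap_if_filter]
  unfold pvCanon
  apply List.filterMap_congr
  intro v _
  have hcv : (!(PySem.Str.isIn "foundation" (PySem.Str.lower v)) && st.getD v false)
      = pvCond nm v := by
    rw [hgetD, pvCond]
    by_cases hF : PySem.Str.isIn "foundation" (PySem.Str.lower v)
    · rw [hF]
      simp
    · have hF' : PySem.Str.isIn "foundation" (PySem.Str.lower v) = false := by
        simpa using hF
      rw [hF']
      simp only [Bool.not_false, Bool.true_and]
      unfold pvLF
      rw [List.any_filter]
      congr 1
      funext p
      by_cases hp : p.2 = v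
      · have hF2 : PySem.Chars.isIn ['f','o','u','n','d','a','t','i','o','n']
            (PySem.Chars.lower v.toList) = false := by simpa [pysem] using hF'
        simp [hp, hF2]
      · simp [beq_eq_false_iff_ne.mpr hp]
  rw [hcv]

-- ===== VERDICT (by name: the statement is the Claim_ definition above) =====
theorem prepare_dict_for_renaming_spec : Claim_equal_prepare_dict_for_renaming := by
  intro nm _
  unfold Spec_prepare_dict_for_renaming
  rw [pvA_eq_canon, pvB_eq_canon]
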